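-- pv_equiv track=rewrite | github.com/Murillo/Hackerrank-Problem-Solving | Implementation/picking-numbers.py | picking_number
-- ===== SOURCE A (Python) =====
-- def picking_number(n, arr):
--     numbers = []
--     for i in range(n):
--         composition = [arr[i]]
--         for j in range(n):
--             if  i != j and arr[i] - arr[j] <= 1 and arr[i] - arr[j] >= -1:
--                 composition.append(arr[j])
--         if len(composition) > len(numbers):
--             numbers = composition
--
--     # print (numbers)
--     min_num = numbers.count(min(numbers)) + numbers.count(min(numbers) + 1)
--     max_num = numbers.count(max(numbers)) + numbers.count(max(numbers) - 1)
--     return min_num if min_num >= max_num else max_num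
-- ===== SOURCE B (Python) =====
-- def picking_number(n, arr):
--     vals = [arr[i] for i in range(n)]
--     cnt = {}
--     for v in vals:
--         cnt[v] = cnt.get(v, 0) + 1
--     best_t = 0
--     best_x = None
--     for x in vals:
--         t = cnt.get(x - 1, 0) + cnt[x] + cnt.get(x + 1, 0)
--         if t > best_t:
--             best_t, best_x = t, x
--     m = best_x - 1 if cnt.get(best_x - 1, 0) > 0 else best_x
--     M = best_x + 1 if cnt.get(best_x + 1, 0) > 0 else best_x
--     min_num = cnt.get(m, 0) + cnt.get(m + 1, 0)
--     max_num = cnt.get(M, 0) + cnt.get(M - 1, 0)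
--     return min_num if min_num >= max_num else max_num
-- ===== Notes on version B (the rewrite author's own statement) =====
-- stated objective: faster
-- what changed: B replaces A's quadratic nested index scan (building an explicit 'composition' list per element and counting in it) by one pass that builds a frequency counter once and, for each value x, compares cnt[x-1]+cnt[x]+cnt[x+1] directly, deriving the final min/max counts from the counter without ever materialising the window list.
import Mathlib
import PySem

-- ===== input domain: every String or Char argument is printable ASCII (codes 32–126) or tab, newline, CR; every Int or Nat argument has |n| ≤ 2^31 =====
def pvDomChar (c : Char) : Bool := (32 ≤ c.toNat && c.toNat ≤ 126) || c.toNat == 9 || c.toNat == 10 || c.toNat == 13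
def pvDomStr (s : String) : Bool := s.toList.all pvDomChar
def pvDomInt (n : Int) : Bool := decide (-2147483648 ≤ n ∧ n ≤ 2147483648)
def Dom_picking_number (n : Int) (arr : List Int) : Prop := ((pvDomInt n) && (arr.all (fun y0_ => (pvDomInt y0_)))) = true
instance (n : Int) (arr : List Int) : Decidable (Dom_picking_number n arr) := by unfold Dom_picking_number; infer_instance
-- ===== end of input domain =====

-- B replaces A's O(n^2) nested scan with a single frequency counter pass (cnt[x-1]+cnt[x]+cnt[x+1]),
-- returning the same value; objective: faster.
-- ===== PORT A =====
def picking_number (n : Int) (arr : List Int) : Int :=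
  let numbers : List Int :=
    (PySem.List.pyRange 0 n 1).foldl (fun numbers i =>
      let composition : List Int :=
        (PySem.List.pyRange 0 n 1).foldl (fun composition j =>
          if i ≠ j ∧ PySem.List.pyGetD arr i 0 - PySem.List.pyGetD arr j 0 ≤ 1 ∧
             PySem.List.pyGetD arr i 0 - PySem.List.pyGetD arr j 0 ≥ -1 then
            composition ++ [PySem.List.pyGetD arr j 0]
          else composition) [PySem.List.pyGetD arr i 0]
      if composition.length > numbers.length then composition else numbers) []
  let mn := ((PySem.List.min? numbers (fun y => y)).getD 0)
  let mx := ((PySem.List.max? numbers (fun y => y)).getD 0)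
  let min_num : Int := (PySem.List.count numbers mn : Int) + (PySem.List.count numbers (mn + 1) : Int)
  let max_num : Int := (PySem.List.count numbers mx : Int) + (PySem.List.count numbers (mx - 1) : Int)
  if min_num ≥ max_num then min_num else max_num

-- ===== PORT B =====
def picking_number_alt (n : Int) (arr : List Int) : Int :=
  let vals := (PySem.List.pyRange 0 n 1).map (fun i => PySem.List.pyGetD arr i 0)
  let cnt : PySem.Dict Int Int := vals.foldl (fun d v => d.insert v (d.getD v 0 + 1)) PySem.Dict.empty
  let best : Int × Option Int :=
    vals.foldl (fun p x =>
      let t := cnt.getD (x - 1) 0 + cnt.getD x 0 + cnt.getD (x + 1) 0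
      if t > p.1 then (t, some x) else p) (0, none)
  match best.2 with
  | none => 0  -- unreachable under Pre_ (Python B raises TypeError on empty vals)
  | some x =>
    let m := if cnt.getD (x - 1) 0 > 0 then x - 1 else x
    let M := if cnt.getD (x + 1) 0 > 0 then x + 1 else x
    let min_num := cnt.getD m 0 + cnt.getD (m + 1) 0
    let max_num := cnt.getD M 0 + cnt.getD (M - 1) 0
    if min_num ≥ max_num then min_num else max_num

-- ===== PRECONDITION & SPEC =====
-- Pre_ excludes inputs where Python A raises: n <= 0 (min() of empty list, ValueError) and
-- n > len(arr) (IndexError on arr[i]).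
def Pre_picking_number (n : Int) (arr : List Int) : Prop := 1 ≤ n ∧ n ≤ (arr.length : Int)
instance (n : Int) (arr : List Int) : Decidable (Pre_picking_number n arr) := by
  unfold Pre_picking_number; infer_instance
def pvWitness_picking_number : Int × List Int := (3, [1, 2, 5])

def Spec_picking_number (n : Int) (arr : List Int) (out : Int) : Prop := out = picking_number_alt n arr
instance (n : Int) (arr : List Int) (out : Int) : Decidable (Spec_picking_number n arr out) := by unfold Spec_picking_number; infer_instance

-- ===== CLAIM (what is proved, stated in full; the proofs are below) =====
def Claim_equal_picking_number : Prop := ∀ (n : Int) (arr : List Int), Dom_picking_number n arr → Pre_picking_number n arr → Spec_picking_number n arr (picking_number n arr)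


-- ===== LEMMAS AND PROOFS =====

-- 'if p(x): out.append(f(x))' over a list builds acc ++ map f (filter p l)  (Prop-valued test)
theorem pv_foldl_append_ite {α β : Type} (l : List α) (p : α → Prop) [DecidablePred p]
    (f : α → β) (acc : List β) :
    l.foldl (fun acc x => if p x then acc ++ [f x] else acc) acc
      = acc ++ (l.filter (fun x => decide (p x))).map f := by
  induction l generalizing acc with
  | nil => simp
  | cons a t ih =>
    by_cases h : p a <;> simp [h, ih]

-- [arr[j] for j in range(n)] = arr[:n]
theorem pv_map_range (arr : List Int) (n : Int) (h1 : 0 ≤ n) (h2 : n ≤ (arr.length : Int)) :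
    (PySem.List.pyRange 0 n 1).map (fun j => PySem.List.pyGetD arr j 0) = arr.take n.toNat := by
  apply List.ext_getElem
  · rw [List.length_map, PySem.List.length_pyRange_one, List.length_take]; omega
  · intro k hk1 hk2
    simp only [List.getElem_map, List.getElem_take]
    rw [PySem.List.getElem_pyRange_one]
    rw [PySem.List.pyGetD_eq_getElem arr 0 (by omega)
      (by rw [List.length_map, PySem.List.length_pyRange_one] at hk1; omega)]
    simp

-- the ±1 window of x in the integers is {x-1, x, x+1}: a count identity for its filter
theorem pv_len_filter_window (l : List Int) (x : Int) :
    ((l.filter (fun v => decide (x - 1 ≤ v ∧ v ≤ x + 1))).length : Int)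
      = (l.count (x - 1) : Int) + (l.count x : Int) + (l.count (x + 1) : Int) := by
  induction l with
  | nil => simp
  | cons a t ih =>
    rw [List.filter_cons]
    by_cases h : x - 1 ≤ a ∧ a ≤ x + 1
    · rw [if_pos (decide_eq_true h)]
      simp only [List.length_cons, List.count_cons, beq_iff_eq]
      push_cast
      rw [ih]
      have hc : a = x - 1 ∨ a = x ∨ a = x + 1 := by omega
      rcases hc with h' | h' | h' <;> subst h' <;> split_ifs <;> omega
    · rw [if_neg (by simpa using h)]
      simp only [List.count_cons, beq_iff_eq]
      push_cast
      rw [ih]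
      split_ifs <;> omega

-- min?/max? with the identity key depend only on the multiset of elements
theorem pv_min?_perm (l l' : List Int) (h : l.Perm l') :
    PySem.List.min? l (fun y => y) = PySem.List.min? l' (fun y => y) := by
  cases h1 : PySem.List.min? l (fun y => y) with
  | none =>
    rw [PySem.List.min?_eq_none_iff] at h1
    subst h1
    rw [h.symm.eq_nil]
    rfl
  | some m =>
    cases h2 : PySem.List.min? l' (fun y => y) with
    | none =>
      rw [PySem.List.min?_eq_none_iff] at h2
      subst h2
      have := PySem.List.min?_mem h1
      simp [h.eq_nil] at this
    | some m' =>
      have hm := PySem.List.min?_mem h1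
      have hm' := PySem.List.min?_mem h2
      have h3 := PySem.List.min?_isMin h1 m' (h.symm.subset hm')
      have h4 := PySem.List.min?_isMin h2 m (h.subset hm)
      simp only [Option.some.injEq]
      omega

theorem pv_max?_perm (l l' : List Int) (h : l.Perm l') :
    PySem.List.max? l (fun y => y) = PySem.List.max? l' (fun y => y) := by
  cases h1 : PySem.List.max? l (fun y => y) with
  | none =>
    rw [PySem.List.max?_eq_none_iff] at h1
    subst h1
    rw [h.symm.eq_nil]
    rfl
  | some m =>
    cases h2 : PySem.List.max? l' (fun y => y) with
    | none =>
      rw [PySem.List.max?_eq_none_iff] at h2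
      subst h2
      have := PySem.List.max?_mem h1
      simp [h.eq_nil] at this
    | some m' =>
      have hm := PySem.List.max?_mem h1
      have hm' := PySem.List.max?_mem h2
      have h3 := PySem.List.max?_isMax h1 m' (h.symm.subset hm')
      have h4 := PySem.List.max?_isMax h2 m (h.subset hm)
      simp only [Option.some.injEq]
      omega

theorem pv_min_filter (l : List Int) (x : Int) (hx : x ∈ l) :
    PySem.List.min? (l.filter (fun v => decide (x - 1 ≤ v ∧ v ≤ x + 1))) (fun y => y)
      = some (if (x - 1) ∈ l then x - 1 else x) := by
  have hxf : x ∈ l.filter (fun v => decide (x - 1 ≤ v ∧ v ≤ x + 1)) := by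
    rw [List.mem_filter]
    exact ⟨hx, decide_eq_true (by omega)⟩
  cases h1 : PySem.List.min? (l.filter (fun v => decide (x - 1 ≤ v ∧ v ≤ x + 1))) (fun y => y) with
  | none =>
    rw [PySem.List.min?_eq_none_iff] at h1
    rw [h1] at hxf
    simp at hxf
  | some m =>
    have hm := PySem.List.min?_mem h1
    rw [List.mem_filter, decide_eq_true_eq] at hm
    have hmin := PySem.List.min?_isMin h1
    have hmx := hmin x hxf
    simp only [Option.some.injEq]
    by_cases hmem : (x - 1) ∈ l
    · rw [if_pos hmem]
      have : x - 1 ∈ l.filter (fun v => decide (x - 1 ≤ v ∧ v ≤ x + 1)) := by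
        rw [List.mem_filter]
        exact ⟨hmem, decide_eq_true (by omega)⟩
      have := hmin _ this
      omega
    · rw [if_neg hmem]
      have hne : m ≠ x - 1 := fun hEq => hmem (hEq ▸ hm.1)
      omega

theorem pv_max_filter (l : List Int) (x : Int) (hx : x ∈ l) :
    PySem.List.max? (l.filter (fun v => decide (x - 1 ≤ v ∧ v ≤ x + 1))) (fun y => y)
      = some (if (x + 1) ∈ l then x + 1 else x) := by
  have hxf : x ∈ l.filter (fun v => decide (x - 1 ≤ v ∧ v ≤ x + 1)) := by
    rw [List.mem_filter]
    exact ⟨hx, decide_eq_true (by omega)⟩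
  cases h1 : PySem.List.max? (l.filter (fun v => decide (x - 1 ≤ v ∧ v ≤ x + 1))) (fun y => y) with
  | none =>
    rw [PySem.List.max?_eq_none_iff] at h1
    rw [h1] at hxf
    simp at hxf
  | some m =>
    have hm := PySem.List.max?_mem h1
    rw [List.mem_filter, decide_eq_true_eq] at hm
    have hmax := PySem.List.max?_isMax h1
    have hmx := hmax x hxf
    simp only [Option.some.injEq]
    by_cases hmem : (x + 1) ∈ l
    · rw [if_pos hmem]
      have : x + 1 ∈ l.filter (fun v => decide (x - 1 ≤ v ∧ v ≤ x + 1)) := by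
        rw [List.mem_filter]
        exact ⟨hmem, decide_eq_true (by omega)⟩
      have := hmax _ this
      omega
    · rw [if_neg hmem]
      have hne : m ≠ x + 1 := fun hEq => hmem (hEq ▸ hm.1)
      omega

-- A's inner loop: the 'composition' built at index i is a permutation of the window filter of arr[:n]
theorem pv_comp_perm (arr : List Int) (n i : Int) (h2 : n ≤ (arr.length : Int))
    (hi0 : 0 ≤ i) (hin : i < n) :
    ((PySem.List.pyRange 0 n 1).foldl (fun composition j =>
        if i ≠ j ∧ PySem.List.pyGetD arr i 0 - PySem.List.pyGetD arr j 0 ≤ 1 ∧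
           PySem.List.pyGetD arr i 0 - PySem.List.pyGetD arr j 0 ≥ -1 then
          composition ++ [PySem.List.pyGetD arr j 0]
        else composition) [PySem.List.pyGetD arr i 0]).Perm
      ((arr.take n.toNat).filter (fun v =>
        decide (PySem.List.pyGetD arr i 0 - 1 ≤ v ∧ v ≤ PySem.List.pyGetD arr i 0 + 1))) := by
  have h1 : (0 : Int) ≤ n := by omega
  rw [pv_foldl_append_ite (PySem.List.pyRange 0 n 1)
    (fun j => i ≠ j ∧ PySem.List.pyGetD arr i 0 - PySem.List.pyGetD arr j 0 ≤ 1 ∧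
      PySem.List.pyGetD arr i 0 - PySem.List.pyGetD arr j 0 ≥ -1)
    (fun j => PySem.List.pyGetD arr j 0) [PySem.List.pyGetD arr i 0]]
  rw [← pv_map_range arr n h1 h2, List.filter_map]
  have hsplit : PySem.List.pyRange 0 n 1 = PySem.List.pyRange 0 i 1 ++ i :: PySem.List.pyRange (i + 1) n 1 := by
    rw [PySem.List.pyRange_one_append 0 i n hi0 (le_of_lt hin), PySem.List.pyRange_one_cons hin]
  rw [hsplit]
  have hcongA : ∀ j ∈ PySem.List.pyRange 0 i 1,
      (decide (i ≠ j ∧ PySem.List.pyGetD arr i 0 - PySem.List.pyGetD arr j 0 ≤ 1 ∧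
        PySem.List.pyGetD arr i 0 - PySem.List.pyGetD arr j 0 ≥ -1))
      = ((fun v => decide (PySem.List.pyGetD arr i 0 - 1 ≤ v ∧ v ≤ PySem.List.pyGetD arr i 0 + 1)) ∘
          (fun j => PySem.List.pyGetD arr j 0)) j := by
    intro j hj
    rw [PySem.List.mem_pyRange_one] at hj
    have hne : i ≠ j := by omega
    simp only [Function.comp]
    rw [decide_eq_decide]
    constructor
    · rintro ⟨_, h2', h3'⟩; exact ⟨by omega, by omega⟩
    · rintro ⟨h2', h3'⟩; exact ⟨hne, by omega, by omega⟩
  have hcongB : ∀ j ∈ PySem.List.pyRange (i + 1) n 1,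
      (decide (i ≠ j ∧ PySem.List.pyGetD arr i 0 - PySem.List.pyGetD arr j 0 ≤ 1 ∧
        PySem.List.pyGetD arr i 0 - PySem.List.pyGetD arr j 0 ≥ -1))
      = ((fun v => decide (PySem.List.pyGetD arr i 0 - 1 ≤ v ∧ v ≤ PySem.List.pyGetD arr i 0 + 1)) ∘
          (fun j => PySem.List.pyGetD arr j 0)) j := by
    intro j hj
    rw [PySem.List.mem_pyRange_one] at hj
    have hne : i ≠ j := by omega
    simp only [Function.comp]
    rw [decide_eq_decide]
    constructor
    · rintro ⟨_, h2', h3'⟩; exact ⟨by omega, by omega⟩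
    · rintro ⟨h2', h3'⟩; exact ⟨hne, by omega, by omega⟩
  rw [List.filter_append, List.filter_append, List.filter_cons, List.filter_cons]
  rw [List.filter_congr hcongA, List.filter_congr hcongB]
  have hPi : (decide (i ≠ i ∧ PySem.List.pyGetD arr i 0 - PySem.List.pyGetD arr i 0 ≤ 1 ∧
      PySem.List.pyGetD arr i 0 - PySem.List.pyGetD arr i 0 ≥ -1)) = false := by
    simp
  have hWi : ((fun v => decide (PySem.List.pyGetD arr i 0 - 1 ≤ v ∧ v ≤ PySem.List.pyGetD arr i 0 + 1)) ∘
      (fun j => PySem.List.pyGetD arr j 0)) i = true := by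
    simp only [Function.comp]
    exact decide_eq_true (by omega)
  rw [hPi, hWi]
  simp only [if_true, List.map_append, List.map_cons, List.singleton_append]
  exact List.perm_middle.symm

-- arr[i] is an element of arr[:n] for 0 <= i < n <= len(arr)
theorem pv_get_mem (arr : List Int) (n i : Int) (h2 : n ≤ (arr.length : Int))
    (hi0 : 0 ≤ i) (hin : i < n) :
    PySem.List.pyGetD arr i 0 ∈ arr.take n.toNat := by
  rw [PySem.List.pyGetD_eq_getElem arr 0 hi0 (by omega)]
  have hlt : i.toNat < (arr.take n.toNat).length := by
    rw [List.length_take]; omega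
  have hmem := List.getElem_mem hlt
  rwa [List.getElem_take] at hmem

-- the selection loops of A and B walk in lock-step: A keeps the first longest composition,
-- B keeps the first maximal counter sum, and the two states stay related
theorem pv_loop (arr : List Int) (n : Int) (h2 : n ≤ (arr.length : Int)) :
    ∀ (l : List Int) (sA : List Int) (x0 : Int),
      (∀ j ∈ l, 0 ≤ j ∧ j < n) →
      x0 ∈ arr.take n.toNat →
      sA.Perm ((arr.take n.toNat).filter (fun v => decide (x0 - 1 ≤ v ∧ v ≤ x0 + 1))) →
      ∃ x1, x1 ∈ arr.take n.toNat ∧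
        (l.foldl (fun numbers i =>
          if ((PySem.List.pyRange 0 n 1).foldl (fun composition j =>
              if i ≠ j ∧ PySem.List.pyGetD arr i 0 - PySem.List.pyGetD arr j 0 ≤ 1 ∧
                 PySem.List.pyGetD arr i 0 - PySem.List.pyGetD arr j 0 ≥ -1 then
                composition ++ [PySem.List.pyGetD arr j 0]
              else composition) [PySem.List.pyGetD arr i 0]).length > numbers.length
          then (PySem.List.pyRange 0 n 1).foldl (fun composition j =>
              if i ≠ j ∧ PySem.List.pyGetD arr i 0 - PySem.List.pyGetD arr j 0 ≤ 1 ∧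
                 PySem.List.pyGetD arr i 0 - PySem.List.pyGetD arr j 0 ≥ -1 then
                composition ++ [PySem.List.pyGetD arr j 0]
              else composition) [PySem.List.pyGetD arr i 0]
          else numbers) sA).Perm
          ((arr.take n.toNat).filter (fun v => decide (x1 - 1 ≤ v ∧ v ≤ x1 + 1))) ∧
        (l.foldl (fun p i =>
          if (PySem.Dict.counter (arr.take n.toNat)).getD (PySem.List.pyGetD arr i 0 - 1) 0 +
             (PySem.Dict.counter (arr.take n.toNat)).getD (PySem.List.pyGetD arr i 0) 0 +
             (PySem.Dict.counter (arr.take n.toNat)).getD (PySem.List.pyGetD arr i 0 + 1) 0 > p.1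
          then ((PySem.Dict.counter (arr.take n.toNat)).getD (PySem.List.pyGetD arr i 0 - 1) 0 +
                (PySem.Dict.counter (arr.take n.toNat)).getD (PySem.List.pyGetD arr i 0) 0 +
                (PySem.Dict.counter (arr.take n.toNat)).getD (PySem.List.pyGetD arr i 0 + 1) 0,
                some (PySem.List.pyGetD arr i 0))
          else p) (((sA.length : Int), some x0) : Int × Option Int))
          = ((((arr.take n.toNat).filter (fun v => decide (x1 - 1 ≤ v ∧ v ≤ x1 + 1))).length : Int),
             some x1) := by
  intro l
  induction l with
  | nil =>
    intro sA x0 _ hx0 hperm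
    refine ⟨x0, hx0, ?_, ?_⟩
    · simpa using hperm
    · simp only [List.foldl_nil]
      rw [hperm.length_eq]
  | cons i t ih =>
    intro sA x0 hj hx0 hperm
    have hi := hj i List.mem_cons_self
    have hcomp := pv_comp_perm arr n i h2 hi.1 hi.2
    have hxmem := pv_get_mem arr n i h2 hi.1 hi.2
    have hT : (PySem.Dict.counter (arr.take n.toNat)).getD (PySem.List.pyGetD arr i 0 - 1) 0 +
        (PySem.Dict.counter (arr.take n.toNat)).getD (PySem.List.pyGetD arr i 0) 0 +
        (PySem.Dict.counter (arr.take n.toNat)).getD (PySem.List.pyGetD arr i 0 + 1) 0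
        = (((arr.take n.toNat).filter (fun v => decide (PySem.List.pyGetD arr i 0 - 1 ≤ v ∧
            v ≤ PySem.List.pyGetD arr i 0 + 1))).length : Int) := by
      rw [PySem.Dict.getD_counter, PySem.Dict.getD_counter, PySem.Dict.getD_counter,
        pv_len_filter_window]
    simp only [List.foldl_cons]
    by_cases hgt : ((arr.take n.toNat).filter (fun v => decide (PySem.List.pyGetD arr i 0 - 1 ≤ v ∧
        v ≤ PySem.List.pyGetD arr i 0 + 1))).length >
        ((arr.take n.toNat).filter (fun v => decide (x0 - 1 ≤ v ∧ v ≤ x0 + 1))).length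
    · rw [if_pos (by rw [hcomp.length_eq, hperm.length_eq]; exact hgt)]
      rw [if_pos (by rw [hT, hperm.length_eq]; exact_mod_cast hgt)]
      obtain ⟨x1, hx1, hA, hB⟩ := ih _ (PySem.List.pyGetD arr i 0) (fun j hjt => hj j (List.mem_cons_of_mem _ hjt)) hxmem hcomp
      refine ⟨x1, hx1, hA, ?_⟩
      rw [← hB, hT, hcomp.length_eq]
    · rw [if_neg (by rw [hcomp.length_eq, hperm.length_eq]; exact hgt)]
      rw [if_neg (by rw [hT, hperm.length_eq]; exact_mod_cast hgt)]
      exact ih _ x0 (fun j hjt => hj j (List.mem_cons_of_mem _ hjt)) hx0 hperm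


-- counts of any permutation of the window filter agree with the counter lookups
theorem pv_final_counts (l : List Int) (x1 v : Int) (L : List Int)
    (hA : L.Perm (l.filter (fun v => decide (x1 - 1 ≤ v ∧ v ≤ x1 + 1))))
    (hv1 : x1 - 1 ≤ v) (hv2 : v ≤ x1 + 1) :
    (PySem.List.count L v : Int) = (PySem.Dict.counter l).getD v 0 := by
  rw [PySem.List.count_eq, hA.count_eq]
  rw [List.count_filter (p := fun v => decide (x1 - 1 ≤ v ∧ v ≤ x1 + 1)) (a := v) (l := l)
    (decide_eq_true ⟨hv1, hv2⟩)]
  rw [PySem.Dict.getD_counter]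

-- full selection: starting from Python's empty 'numbers' and B's (0, None), with n >= 1
theorem pv_sel (arr : List Int) (n : Int) (h1 : 1 ≤ n) (h2 : n ≤ (arr.length : Int)) :
    ∃ x1, x1 ∈ arr.take n.toNat ∧
      ((PySem.List.pyRange 0 n 1).foldl (fun numbers i =>
        if ((PySem.List.pyRange 0 n 1).foldl (fun composition j =>
            if i ≠ j ∧ PySem.List.pyGetD arr i 0 - PySem.List.pyGetD arr j 0 ≤ 1 ∧
               PySem.List.pyGetD arr i 0 - PySem.List.pyGetD arr j 0 ≥ -1 then
              composition ++ [PySem.List.pyGetD arr j 0]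
            else composition) [PySem.List.pyGetD arr i 0]).length > numbers.length
        then (PySem.List.pyRange 0 n 1).foldl (fun composition j =>
            if i ≠ j ∧ PySem.List.pyGetD arr i 0 - PySem.List.pyGetD arr j 0 ≤ 1 ∧
               PySem.List.pyGetD arr i 0 - PySem.List.pyGetD arr j 0 ≥ -1 then
              composition ++ [PySem.List.pyGetD arr j 0]
            else composition) [PySem.List.pyGetD arr i 0]
        else numbers) []).Perm
        ((arr.take n.toNat).filter (fun v => decide (x1 - 1 ≤ v ∧ v ≤ x1 + 1))) ∧
      ((PySem.List.pyRange 0 n 1).foldl (fun p i =>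
        if (PySem.Dict.counter (arr.take n.toNat)).getD (PySem.List.pyGetD arr i 0 - 1) 0 +
           (PySem.Dict.counter (arr.take n.toNat)).getD (PySem.List.pyGetD arr i 0) 0 +
           (PySem.Dict.counter (arr.take n.toNat)).getD (PySem.List.pyGetD arr i 0 + 1) 0 > p.1
        then ((PySem.Dict.counter (arr.take n.toNat)).getD (PySem.List.pyGetD arr i 0 - 1) 0 +
              (PySem.Dict.counter (arr.take n.toNat)).getD (PySem.List.pyGetD arr i 0) 0 +
              (PySem.Dict.counter (arr.take n.toNat)).getD (PySem.List.pyGetD arr i 0 + 1) 0,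
              some (PySem.List.pyGetD arr i 0))
        else p) (((0 : Int), (none : Option Int)) : Int × Option Int))
        = ((((arr.take n.toNat).filter (fun v => decide (x1 - 1 ≤ v ∧ v ≤ x1 + 1))).length : Int),
           some x1) := by
  have hsplit0 : PySem.List.pyRange 0 n 1 = 0 :: PySem.List.pyRange (0 + 1) n 1 :=
    PySem.List.pyRange_one_cons (show (0 : Int) < n by omega)
  have hcomp0 := pv_comp_perm arr n 0 h2 (le_refl 0) (by omega)
  have hmem0 := pv_get_mem arr n 0 h2 (le_refl 0) (by omega)
  have hposlen : 0 < ((arr.take n.toNat).filter (fun v =>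
      decide (PySem.List.pyGetD arr 0 0 - 1 ≤ v ∧ v ≤ PySem.List.pyGetD arr 0 0 + 1))).length := by
    apply List.length_pos_of_mem (a := PySem.List.pyGetD arr 0 0)
    rw [List.mem_filter]
    exact ⟨hmem0, decide_eq_true (by omega)⟩
  have hT0 : (PySem.Dict.counter (arr.take n.toNat)).getD (PySem.List.pyGetD arr 0 0 - 1) 0 +
      (PySem.Dict.counter (arr.take n.toNat)).getD (PySem.List.pyGetD arr 0 0) 0 +
      (PySem.Dict.counter (arr.take n.toNat)).getD (PySem.List.pyGetD arr 0 0 + 1) 0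
      = (((arr.take n.toNat).filter (fun v => decide (PySem.List.pyGetD arr 0 0 - 1 ≤ v ∧
          v ≤ PySem.List.pyGetD arr 0 0 + 1))).length : Int) := by
    rw [PySem.Dict.getD_counter, PySem.Dict.getD_counter, PySem.Dict.getD_counter,
      pv_len_filter_window]
  generalize hF : (fun (numbers : List Int) (i : Int) =>
      if ((PySem.List.pyRange 0 n 1).foldl (fun composition j =>
          if i ≠ j ∧ PySem.List.pyGetD arr i 0 - PySem.List.pyGetD arr j 0 ≤ 1 ∧
             PySem.List.pyGetD arr i 0 - PySem.List.pyGetD arr j 0 ≥ -1 then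
            composition ++ [PySem.List.pyGetD arr j 0]
          else composition) [PySem.List.pyGetD arr i 0]).length > numbers.length
      then (PySem.List.pyRange 0 n 1).foldl (fun composition j =>
          if i ≠ j ∧ PySem.List.pyGetD arr i 0 - PySem.List.pyGetD arr j 0 ≤ 1 ∧
             PySem.List.pyGetD arr i 0 - PySem.List.pyGetD arr j 0 ≥ -1 then
            composition ++ [PySem.List.pyGetD arr j 0]
          else composition) [PySem.List.pyGetD arr i 0]
      else numbers) = F
  generalize hG : (fun (p : Int × Option Int) (i : Int) =>
      if (PySem.Dict.counter (arr.take n.toNat)).getD (PySem.List.pyGetD arr i 0 - 1) 0 +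
         (PySem.Dict.counter (arr.take n.toNat)).getD (PySem.List.pyGetD arr i 0) 0 +
         (PySem.Dict.counter (arr.take n.toNat)).getD (PySem.List.pyGetD arr i 0 + 1) 0 > p.1
      then ((PySem.Dict.counter (arr.take n.toNat)).getD (PySem.List.pyGetD arr i 0 - 1) 0 +
            (PySem.Dict.counter (arr.take n.toNat)).getD (PySem.List.pyGetD arr i 0) 0 +
            (PySem.Dict.counter (arr.take n.toNat)).getD (PySem.List.pyGetD arr i 0 + 1) 0,
            some (PySem.List.pyGetD arr i 0))
      else p) = G
  rw [hsplit0]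
  simp only [List.foldl_cons]
  subst hF
  subst hG
  beta_reduce
  rw [if_pos (show _ > ([] : List Int).length by rw [hcomp0.length_eq]; simpa using hposlen)]
  rw [if_pos (show _ > (((0 : Int), (none : Option Int)) : Int × Option Int).1 by
    rw [hT0]; simp only [gt_iff_lt]; exact_mod_cast hposlen)]
  have hstep := pv_loop arr n h2 (PySem.List.pyRange (0 + 1) n 1) _ (PySem.List.pyGetD arr 0 0)
    (fun j hj => by rw [PySem.List.mem_pyRange_one] at hj; exact ⟨by omega, hj.2⟩)
    hmem0 hcomp0
  obtain ⟨x1, hx1, hA, hB⟩ := hstep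
  refine ⟨x1, hx1, hA, ?_⟩
  rw [← hB, hT0, hcomp0.length_eq]

-- ===== VERDICT (by name: the statement is the Claim_ definition above) =====
theorem picking_number_spec : Claim_equal_picking_number := by
  intro n arr hdom hpre
  obtain ⟨h1, h2⟩ := hpre
  unfold Spec_picking_number
  simp only [picking_number, picking_number_alt]
  rw [PySem.Dict.foldl_insert_getD_add_one_eq_counter]
  obtain ⟨x1, hx1, hA, hB⟩ := pv_sel arr n h1 h2
  have hv := pv_map_range arr n (by omega) h2
  -- turn B's value-fold over vals into the index-fold over range(n), and vals into arr[:n]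
  rw [List.foldl_map, hv]
  simp only [hB]
  have hmin := (pv_min?_perm _ _ hA).trans (pv_min_filter (arr.take n.toNat) x1 hx1)
  have hmax := (pv_max?_perm _ _ hA).trans (pv_max_filter (arr.take n.toNat) x1 hx1)
  rw [hmin, hmax]
  simp only [Option.getD_some]
  have hc1 : ((PySem.Dict.counter (arr.take n.toNat)).getD (x1 - 1) 0 > 0) ↔
      (x1 - 1) ∈ arr.take n.toNat := by
    rw [PySem.Dict.getD_counter, gt_iff_lt, Int.natCast_pos]
    exact List.count_pos_iff
  have hc2 : ((PySem.Dict.counter (arr.take n.toNat)).getD (x1 + 1) 0 > 0) ↔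
      (x1 + 1) ∈ arr.take n.toNat := by
    rw [PySem.Dict.getD_counter, gt_iff_lt, Int.natCast_pos]
    exact List.count_pos_iff
  by_cases hm1 : (x1 - 1) ∈ arr.take n.toNat <;> by_cases hm2 : (x1 + 1) ∈ arr.take n.toNat <;>
    [rw [if_pos hm1, if_pos hm2, if_pos (hc1.mpr hm1), if_pos (hc2.mpr hm2)];
     rw [if_pos hm1, if_neg hm2, if_pos (hc1.mpr hm1), if_neg (fun h => hm2 (hc2.mp h))];
     rw [if_neg hm1, if_pos hm2, if_neg (fun h => hm1 (hc1.mp h)), if_pos (hc2.mpr hm2)];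
     rw [if_neg hm1, if_neg hm2, if_neg (fun h => hm1 (hc1.mp h)), if_neg (fun h => hm2 (hc2.mp h))]] <;>
  repeat rw [pv_final_counts _ x1 _ _ hA (by omega) (by omega)]
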